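-- pv_equiv track=rewrite | github.com/johndun/tabulardl | experiments/beautyreviews/data.py | _grouped_record_ids
-- ===== SOURCE A (Python) =====
-- def _grouped_record_ids(users, timestamps):
--     """Provides interaction indices for each user."""
--     user_record_id_map = {}
--     for idx, (user, timestamp) in enumerate(zip(users, timestamps)):
--         user_ids = user_record_id_map.get(user, [])
--         user_ids.append((idx, timestamp))
--         user_record_id_map[user] = user_ids
--     grouped_record_ids = [
--         [x[0] for x in sorted(ids, key=lambda x: x[1])]
--         for ids in user_record_id_map.values()
--     ]
--     return grouped_record_ids
-- ===== SOURCE B (Python) =====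
-- def _grouped_record_ids(users, timestamps):
--     """Provides interaction indices for each user."""
--     pairs = list(enumerate(zip(users, timestamps)))
--     # buckets keyed by user in order of first appearance
--     buckets = {user: [] for _, (user, _) in pairs}
--     # one global stable sort by timestamp, then distribute indices
--     for idx, (user, _) in sorted(pairs, key=lambda e: e[1][1]):
--         buckets[user].append(idx)
--     return list(buckets.values())
-- ===== Notes on version B (the rewrite author's own statement) =====
-- stated objective: alternative
-- what changed: Replaces the per-user sort of each bucket's (idx, timestamp) pairs by one global stable sort of all records by timestamp followed by a single distribution pass into buckets pre-registered in first-appearance order.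
import Mathlib
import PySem

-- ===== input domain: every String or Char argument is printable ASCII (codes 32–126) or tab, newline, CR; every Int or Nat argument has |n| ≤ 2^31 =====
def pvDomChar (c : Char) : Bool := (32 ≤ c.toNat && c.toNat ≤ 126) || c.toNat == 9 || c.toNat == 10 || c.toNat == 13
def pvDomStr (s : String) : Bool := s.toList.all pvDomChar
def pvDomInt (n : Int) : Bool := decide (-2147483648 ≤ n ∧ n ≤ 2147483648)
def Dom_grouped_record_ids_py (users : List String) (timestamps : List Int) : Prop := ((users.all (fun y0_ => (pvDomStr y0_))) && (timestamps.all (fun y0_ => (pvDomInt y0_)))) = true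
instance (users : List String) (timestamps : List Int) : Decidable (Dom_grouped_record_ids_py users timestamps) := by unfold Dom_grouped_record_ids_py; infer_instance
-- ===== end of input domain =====

-- B replaces A's per-user sorts of (idx, timestamp) buckets by one global stable sort by
-- timestamp plus a single distribution pass into buckets pre-registered in first-appearance
-- order (objective: alternative algorithm of the same cost).


-- ===== PORT A =====
-- dict loop 'ids = d.get(u, []); ids.append(p); d[u] = ids' is Dict.modify u [] (· ++ [p])
def grouped_record_ids_py (users : List String) (timestamps : List Int) : List (List Int) :=
  let d := (PySem.List.enumerate (users.zip timestamps)).foldl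
    (fun d e => d.modify e.2.1 [] (fun v => v ++ [(e.1, e.2.2)])) PySem.Dict.empty
  d.values.map (fun ids => (PySem.List.sorted ids (fun x => x.2)).map (fun x => x.1))

-- ===== PORT B =====
-- 'buckets[user].append(idx)' on an always-present key is Dict.modify user [] (· ++ [idx])
def grouped_record_ids_py_alt (users : List String) (timestamps : List Int) : List (List Int) :=
  let pairs := PySem.List.enumerate (users.zip timestamps)
  let buckets := pairs.foldl (fun d e => d.insert e.2.1 ([] : List Int)) PySem.Dict.empty
  let d := (PySem.List.sorted pairs (fun e => e.2.2)).foldl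
    (fun d e => d.modify e.2.1 [] (fun v => v ++ [e.1])) buckets
  d.values

-- ===== PRECONDITION & SPEC =====
def Spec_grouped_record_ids_py (users : List String) (timestamps : List Int) (out : List (List Int)) : Prop := out = grouped_record_ids_py_alt users timestamps
instance (users : List String) (timestamps : List Int) (out : List (List Int)) : Decidable (Spec_grouped_record_ids_py users timestamps out) := by unfold Spec_grouped_record_ids_py; infer_instance

-- ===== CLAIM (what is proved, stated in full; the proofs are below) =====
def Claim_equal_grouped_record_ids_py : Prop := ∀ (users : List String) (timestamps : List Int), Dom_grouped_record_ids_py users timestamps → Spec_grouped_record_ids_py users timestamps (grouped_record_ids_py users timestamps)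

-- ===== LEMMAS AND PROOFS =====

-- insertBy commutes with map when the comparison only looks through g
theorem pvInsertBy_map {α β : Type} (g : α → β) (b : α → α → Bool) (b' : β → β → Bool)
    (h : ∀ x y, b' (g x) (g y) = b x y) (x : α) (s : List α) :
    PySem.List.insertBy b' (g x) (s.map g) = (PySem.List.insertBy b x s).map g := by
  induction s with
  | nil => simp [PySem.List.insertBy]
  | cons y t ih =>
    simp only [List.map_cons, PySem.List.insertBy, h x y]
    by_cases hb : b x y = true <;> simp [hb, ih]

theorem pvFoldl_insertBy_map {α β κ : Type} [LT κ] [DecidableLT κ] (g : α → β) (key : β → κ)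
    (l : List α) (acc : List α) :
    List.foldl (fun a x => PySem.List.insertBy (fun p q => decide (key p < key q)) (g x) a) (acc.map g) l
      = (List.foldl (fun a x => PySem.List.insertBy (fun p q => decide (key (g p) < key (g q))) x a) acc l).map g := by
  induction l generalizing acc with
  | nil => rfl
  | cons x t ih =>
    simp only [List.foldl_cons]
    rw [pvInsertBy_map g (fun p q => decide (key (g p) < key (g q))) (fun p q => decide (key p < key q)) (fun _ _ => rfl) x acc]
    exact ih _

-- sorted of a mapped list is the mapped sort under the composed key
theorem pvSorted_map {α β κ : Type} [LT κ] [DecidableLT κ] (g : α → β) (key : β → κ) (l : List α) :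
    PySem.List.sorted (l.map g) key = (PySem.List.sorted l (fun x => key (g x))).map g := by
  rw [PySem.List.sorted_eq_foldl_insertBy, PySem.List.sorted_eq_foldl_insertBy, List.foldl_map]
  simpa using pvFoldl_insertBy_map g key l []

theorem pvInsertBy_all_before {α : Type} (b : α → α → Bool) (x : α) (s : List α)
    (h : ∀ z ∈ s, b x z = true) : PySem.List.insertBy b x s = x :: s := by
  cases s with
  | nil => rfl
  | cons y t => simp [PySem.List.insertBy, h y (by simp)]

-- filtering commutes with a single stable insertion into a key-sorted list
theorem pvInsertBy_filter {α κ : Type} [LinearOrder κ] (key : α → κ) (p : α → Bool) (x : α)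
    (s : List α) (hs : s.Pairwise (fun a b => key a ≤ key b)) :
    (PySem.List.insertBy (fun a b => decide (key a < key b)) x s).filter p =
      if p x then PySem.List.insertBy (fun a b => decide (key a < key b)) x (s.filter p)
      else s.filter p := by
  induction s with
  | nil => by_cases hp : p x = true <;> simp [PySem.List.insertBy, hp]
  | cons y t ih =>
    have hy : ∀ z ∈ t, key y ≤ key z := (List.pairwise_cons.mp hs).1
    have ht : t.Pairwise (fun a b => key a ≤ key b) := (List.pairwise_cons.mp hs).2
    by_cases hxy : key x < key y
    · simp only [PySem.List.insertBy, hxy, decide_true, if_true]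
      by_cases hp : p x = true
      · by_cases hpy : p y = true
        · simp [hp, hpy, PySem.List.insertBy, hxy]
        · simp only [List.filter_cons, hp, hpy, if_true, Bool.false_eq_true, if_false]
          rw [pvInsertBy_all_before]
          intro z hz
          have := hy z (List.mem_of_mem_filter hz)
          simp [lt_of_lt_of_le hxy this]
      · by_cases hpy : p y = true <;> simp [hp, hpy]
    · simp only [PySem.List.insertBy, hxy, decide_false, Bool.false_eq_true, if_false]
      by_cases hp : p x = true
      · by_cases hpy : p y = true
        · simp [hp, hpy, ih ht, PySem.List.insertBy, hxy]
        · simp [hp, hpy, ih ht]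
      · by_cases hpy : p y = true <;> simp [hp, hpy, ih ht]

theorem pvSorted_append_singleton {α κ : Type} [LT κ] [DecidableLT κ] (key : α → κ) (l : List α) (x : α) :
    PySem.List.sorted (l ++ [x]) key =
      PySem.List.insertBy (fun a b => decide (key a < key b)) x (PySem.List.sorted l key) := by
  rw [PySem.List.sorted_eq_foldl_insertBy, PySem.List.sorted_eq_foldl_insertBy, List.foldl_append]
  rfl

-- filtering commutes with the stable sort
theorem pvFilter_sorted {α κ : Type} [LinearOrder κ] (key : α → κ) (p : α → Bool) (l : List α) :
    (PySem.List.sorted l key).filter p = PySem.List.sorted (l.filter p) key := by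
  induction l using List.reverseRecOn with
  | nil => simp [PySem.List.sorted_eq_foldl_insertBy]
  | append_singleton l x ih =>
    rw [pvSorted_append_singleton, pvInsertBy_filter key p x _ (PySem.List.sorted_pairwise l key),
      List.filter_append]
    by_cases hp : p x = true
    · simp [hp, pvSorted_append_singleton, ih]
    · simp [hp, ih]

theorem pvSet_update_self {κ : Type} [BEq κ] [LawfulBEq κ] (l : List κ) : ∀ (s : PySem.Set κ),
    (∀ x ∈ l, x ∈ s) → PySem.Set.update s l = s := by
  induction l with
  | nil => intro s _; rfl
  | cons x t ih =>
    intro s h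
    have hx : PySem.Set.add s x = s := by
      have hmem : x ∈ s := h x (by simp)
      simp [PySem.Set.add, hmem]
    show PySem.Set.update (PySem.Set.add s x) t = s
    rw [hx]
    exact ih s (fun z hz => h z (by simp [hz]))

theorem pvGetD_foldl_insert_nil {κ β : Type} [BEq κ] [LawfulBEq κ] [DecidableEq κ]
    (l : List β) (k : β → κ) (u : κ) : ∀ (d : PySem.Dict κ (List Int)), d.getD u [] = [] →
    (l.foldl (fun d e => d.insert (k e) []) d).getD u [] = [] := by
  induction l with
  | nil => intro d hd; exact hd
  | cons x t ih =>
    intro d hd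
    refine ih _ ?_
    rw [PySem.Dict.getD_insert]
    split
    · rfl
    · exact hd

-- ===== VERDICT (by name: the statement is the Claim_ definition above) =====
theorem grouped_record_ids_py_spec : Claim_equal_grouped_record_ids_py := by
  intro users timestamps _
  unfold Spec_grouped_record_ids_py grouped_record_ids_py grouped_record_ids_py_alt
  dsimp only
  set enum := PySem.List.enumerate (users.zip timestamps) with henum
  set dA := enum.foldl (fun d e => d.modify e.2.1 [] (fun v => v ++ [(e.1, e.2.2)])) PySem.Dict.empty with hdA
  set buckets := enum.foldl (fun d e => d.insert e.2.1 ([] : List Int)) PySem.Dict.empty with hbuckets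
  set glob := PySem.List.sorted enum (fun e => e.2.2) with hglob
  set dB := glob.foldl (fun d e => d.modify e.2.1 [] (fun v => v ++ [e.1])) buckets with hdB
  -- keys
  have hkA : dA.keys = PySem.Set.update [] (enum.map (fun e => e.2.1)) :=
    PySem.Dict.keys_foldl_modify_key enum (fun e => e.2.1) [] (fun _ e v => v ++ [(e.1, e.2.2)]) _
  have hkbuckets : buckets.keys = PySem.Set.update [] (enum.map (fun e => e.2.1)) :=
    PySem.Dict.keys_foldl_insert_key enum (fun e => e.2.1) (fun _ _ => []) _
  have hkB : dB.keys = dA.keys := by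
    rw [hdB, PySem.Dict.keys_foldl_modify_key glob (fun e => e.2.1) [] (fun _ e v => v ++ [e.1]) _,
      hkbuckets, hkA]
    apply pvSet_update_self
    intro x hx
    rcases List.mem_map.mp hx with ⟨e, he, rfl⟩
    have : e ∈ enum := (PySem.List.mem_sorted enum _ _ e).mp he
    exact (PySem.Set.mem_ofList _ _).mpr (List.mem_map.mpr ⟨e, this, rfl⟩)
  have hndA : dA.keys.Nodup :=
    PySem.Dict.nodup_keys_foldl_modify_key enum (fun e => e.2.1) [] _ _ PySem.Dict.nodup_keys_empty
  have hndB : dB.keys.Nodup := by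
    rw [hkB]; exact hndA
  -- per-key contents of A's dict
  have hgetA : ∀ u, dA.getD u [] =
      (enum.filter (fun e => e.2.1 == u)).map (fun e => (e.1, e.2.2)) := by
    intro u
    have h1 : dA = (enum.map (fun e => (e.2.1, (e.1, e.2.2)))).foldl
        (fun d p => d.modify p.1 [] (fun v => v ++ [p.2])) PySem.Dict.empty := by
      rw [hdA, List.foldl_map]
    rw [h1, PySem.Dict.getD_foldl_modify_append, List.filter_map, List.map_map]
    rfl
  -- per-key contents of B's dict
  have hgetBuckets : ∀ u, buckets.getD u [] = [] := by
    intro u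
    exact pvGetD_foldl_insert_nil enum (fun e => e.2.1) u PySem.Dict.empty (by simp [PySem.Dict.getD_empty])
  have hgetB : ∀ u, dB.getD u [] = (glob.filter (fun e => e.2.1 == u)).map (fun e => e.1) := by
    intro u
    have h1 : dB = (glob.map (fun e => (e.2.1, e.1))).foldl
        (fun d p => d.modify p.1 [] (fun v => v ++ [p.2])) buckets := by
      rw [hdB, List.foldl_map]
    rw [h1, PySem.Dict.getD_foldl_modify_append, hgetBuckets, List.filter_map, List.map_map]
    rfl
  -- pointwise agreement of the two per-user lists
  have hpt : ∀ u, (PySem.List.sorted (dA.getD u []) (fun x => x.2)).map (fun x => x.1)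
      = dB.getD u [] := by
    intro u
    rw [hgetA, hgetB, hglob, pvFilter_sorted,
      pvSorted_map (fun e => ((e.1 : Int), (e.2.2 : Int))) (fun x => x.2)
        (enum.filter (fun e => e.2.1 == u)), List.map_map]
    rfl
  -- assemble via values = keys.map getD
  rw [PySem.Dict.values_eq_map_keys dA hndA [], PySem.Dict.values_eq_map_keys dB hndB [],
    hkB, List.map_map]
  exact List.map_congr_left (fun u _ => hpt u)
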